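-- pv_equiv track=rewrite | github.com/didinska21/DISCORD | bot.py | _pop_first_indices
-- ===== SOURCE A (Python) =====
-- def _pop_first_indices(q):
--     """return tuple (photo_idx, link_idx) or (None,None) if not found."""
--     photo_idx = None
--     link_idx = None
--     for i, it in enumerate(q):
--         if photo_idx is None and ("path" in it and it.get("type") != "link"):
--             photo_idx = i
--         if link_idx is None and it.get("type") == "link":
--             link_idx = i
--         if photo_idx is not None and link_idx is not None:
--             break
--     return photo_idx, link_idx
-- ===== SOURCE B (Python) =====
-- def _pop_first_indices(q):
--     """return tuple (photo_idx, link_idx) or (None,None) if not found."""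
--     photo_idx = next((i for i, it in enumerate(q)
--                       if "path" in it and it.get("type") != "link"), None)
--     link_idx = next((i for i, it in enumerate(q)
--                      if it.get("type") == "link"), None)
--     return photo_idx, link_idx
-- ===== Notes on version B (the rewrite author's own statement) =====
-- stated objective: simpler
-- what changed: Replaces A's single interleaved early-exit loop maintaining two accumulators with two independent first-match scans (next over a generator per index), so each search is expressed on its own.
import Mathlib
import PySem

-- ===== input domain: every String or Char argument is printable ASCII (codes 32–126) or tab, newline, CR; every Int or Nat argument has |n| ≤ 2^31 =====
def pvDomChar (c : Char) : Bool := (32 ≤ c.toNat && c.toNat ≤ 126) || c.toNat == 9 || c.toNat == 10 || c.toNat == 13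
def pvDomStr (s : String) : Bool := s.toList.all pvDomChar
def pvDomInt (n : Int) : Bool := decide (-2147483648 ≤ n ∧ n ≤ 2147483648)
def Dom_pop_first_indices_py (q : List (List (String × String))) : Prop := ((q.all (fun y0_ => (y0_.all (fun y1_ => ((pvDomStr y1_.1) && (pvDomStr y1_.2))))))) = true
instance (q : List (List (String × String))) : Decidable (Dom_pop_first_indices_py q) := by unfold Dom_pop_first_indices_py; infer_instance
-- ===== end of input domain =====

-- B replaces A's single interleaved early-exit loop by two independent first-match searches (one per index); objective: simpler.


-- ===== PORT A =====
-- dict lookup (first match; a Python dict has unique keys, so first match is exact)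
def pvDictGet? (d : List (String × String)) (k : String) : Option String :=
  match d with
  | [] => none
  | (k', v) :: rest => if k' == k then some v else pvDictGet? rest k

-- A's loop: one pass, two accumulators, break once both are found
def popLoopA (q : List (List (String × String))) (i : Int)
    (photo link : Option Int) : Option Int × Option Int :=
  match q with
  | [] => (photo, link)
  | it :: rest =>
    let photo' := if photo = none ∧ (pvDictGet? it "path").isSome ∧ pvDictGet? it "type" ≠ some "link"
                  then some i else photo
    let link' := if link = none ∧ pvDictGet? it "type" = some "link" then some i else link
    if photo' ≠ none ∧ link' ≠ none then (photo', link')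
    else popLoopA rest (i + 1) photo' link'

def pop_first_indices_py (q : List (List (String × String))) : Option Int × Option Int :=
  popLoopA q 0 none none

-- ===== PORT B =====
-- first index with "path" present and type ≠ "link"
def pvFindPhoto (q : List (List (String × String))) (i : Int) : Option Int :=
  match q with
  | [] => none
  | it :: rest =>
    if (pvDictGet? it "path").isSome ∧ pvDictGet? it "type" ≠ some "link" then some i
    else pvFindPhoto rest (i + 1)

-- first index with type = "link"
def pvFindLink (q : List (List (String × String))) (i : Int) : Option Int :=
  match q with
  | [] => none
  | it :: rest =>
    if pvDictGet? it "type" = some "link" then some i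
    else pvFindLink rest (i + 1)

def pop_first_indices_py_alt (q : List (List (String × String))) : Option Int × Option Int :=
  (pvFindPhoto q 0, pvFindLink q 0)

-- ===== PRECONDITION & SPEC =====
def Spec_pop_first_indices_py (q : List (List (String × String))) (out : Option Int × Option Int) : Prop := out = pop_first_indices_py_alt q
instance (q : List (List (String × String))) (out : Option Int × Option Int) : Decidable (Spec_pop_first_indices_py q out) := by unfold Spec_pop_first_indices_py; infer_instance

-- ===== CLAIM (what is proved, stated in full; the proofs are below) =====
def Claim_equal_pop_first_indices_py : Prop := ∀ (q : List (List (String × String))), Dom_pop_first_indices_py q → Spec_pop_first_indices_py q (pop_first_indices_py q)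

-- ===== LEMMAS AND PROOFS =====
-- A's loop, from any state, yields the already-found index or else B's search from here.
theorem popLoopA_eq (q : List (List (String × String))) :
    ∀ (i : Int) (photo link : Option Int),
      popLoopA q i photo link =
        ((if photo = none then pvFindPhoto q i else photo),
         (if link = none then pvFindLink q i else link)) := by
  induction q with
  | nil => intro i photo link; simp [popLoopA, pvFindPhoto, pvFindLink]
  | cons it rest ih =>
    intro i photo link
    by_cases hcp : (pvDictGet? it "path").isSome ∧ pvDictGet? it "type" ≠ some "link" <;>
    by_cases hcl : pvDictGet? it "type" = some "link" <;>
    cases photo <;> cases link <;>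
      by_cases hpp : (pvDictGet? it "path").isSome = true <;>
      simp_all [popLoopA, pvFindPhoto, pvFindLink, ih, Option.isSome_iff_ne_none]

-- ===== VERDICT (by name: the statement is the Claim_ definition above) =====
theorem pop_first_indices_py_spec : Claim_equal_pop_first_indices_py := by
  intro q _
  unfold Spec_pop_first_indices_py pop_first_indices_py pop_first_indices_py_alt
  simp [popLoopA_eq]
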